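-- pv_equiv track=rewrite | github.com/nishant-ai/foobar-with-Google | Level 2/2 - en route salute/solution.py | solution
-- ===== SOURCE A (Python) =====
-- def solution(s):
--     right = 0 # all right going commanders
--     salutes = 0 # total salutes
--
--     # Traversing the path
--     for char in s:
--         if char == '>':
--             right+=1
--         if char == '<':
--             salutes+= right*2
--
--     return salutes
-- ===== SOURCE B (Python) =====
-- def solution(s):
--     chars = list(s)
--     total = 0
--     for i, c in enumerate(chars):
--         if c == '>':
--             total += chars[i + 1:].count('<')
--     return 2 * total
-- ===== Notes on version B (the rewrite author's own statement) =====
-- stated objective: alternative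
-- what changed: Replaces A's single-pass running counter of right-going commanders with a direct pair count: for each '>' an inner scan counts the '<' after it, and the total is doubled once at the end.
import Mathlib
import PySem

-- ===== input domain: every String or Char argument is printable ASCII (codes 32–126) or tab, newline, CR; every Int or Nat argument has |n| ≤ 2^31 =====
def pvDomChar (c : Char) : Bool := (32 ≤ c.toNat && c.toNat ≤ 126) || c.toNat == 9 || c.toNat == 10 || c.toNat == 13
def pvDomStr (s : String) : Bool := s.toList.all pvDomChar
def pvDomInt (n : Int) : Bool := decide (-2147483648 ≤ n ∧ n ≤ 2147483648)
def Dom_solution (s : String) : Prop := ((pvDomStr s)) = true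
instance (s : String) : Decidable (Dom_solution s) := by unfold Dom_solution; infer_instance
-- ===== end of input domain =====

-- B counts salute pairs directly (for each '>' it scans the suffix for '<'), instead of A's running counter; same return value.

-- ===== PORT A =====
-- the loop: state (right, salutes), both ifs in A's order
def solutionLoop : List Char → Int → Int → Int
  | [], _, salutes => salutes
  | c :: rest, right, salutes =>
    let right' := if c = '>' then right + 1 else right
    let salutes' := if c = '<' then salutes + right' * 2 else salutes
    solutionLoop rest right' salutes'

def solution (s : String) : Int := solutionLoop s.toList 0 0

-- ===== PORT B =====
-- the loop: at each position, if the char is '>', add the count of '<' in the remaining suffix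
def solutionAltLoop : List Char → Int → Int
  | [], total => total
  | c :: rest, total =>
    solutionAltLoop rest (total + if c = '>' then (rest.count '<' : Int) else 0)

def solution_alt (s : String) : Int := 2 * solutionAltLoop s.toList 0

-- ===== PRECONDITION & SPEC =====
def Spec_solution (s : String) (out : Int) : Prop := out = solution_alt s
instance (s : String) (out : Int) : Decidable (Spec_solution s out) := by unfold Spec_solution; infer_instance

-- ===== CLAIM (what is proved, stated in full; the proofs are below) =====
def Claim_equal_solution : Prop := ∀ (s : String), Dom_solution s → Spec_solution s (solution s)

-- ===== LEMMAS AND PROOFS =====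

-- pairs l = number of (i<j) with l[i]='>' and l[j]='<', as B's recursion computes it
def pvPairs : List Char → Int
  | [] => 0
  | c :: rest => (if c = '>' then (rest.count '<' : Int) else 0) + pvPairs rest

lemma solutionAltLoop_eq (l : List Char) (t : Int) :
    solutionAltLoop l t = t + pvPairs l := by
  induction l generalizing t with
  | nil => simp [solutionAltLoop, pvPairs]
  | cons c rest ih => simp [solutionAltLoop, pvPairs, ih]; ring

lemma solutionLoop_eq (l : List Char) (r sal : Int) :
    solutionLoop l r sal = sal + 2 * r * (l.count '<' : Int) + 2 * pvPairs l := by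
  induction l generalizing r sal with
  | nil => simp [solutionLoop, pvPairs]
  | cons c rest ih =>
    simp only [solutionLoop, pvPairs]
    by_cases h : c = '>'
    · have h2 : ¬ c = '<' := by subst h; decide
      simp [h, h2, ih, List.count_cons]
      ring
    · by_cases h3 : c = '<'
      · simp [h, h3, ih]
        ring
      · simp [h, h3, ih, List.count_cons]

-- ===== VERDICT (by name: the statement is the Claim_ definition above) =====
theorem solution_spec : Claim_equal_solution := by
  intro s _
  unfold Spec_solution solution solution_alt
  rw [solutionLoop_eq, solutionAltLoop_eq]
  ring
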